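-- pv_equiv track=rewrite | github.com/GHLisz/algorithm-exercises | lintcode/897-island-city.py | numIslandCities
-- ===== SOURCE A (Python) =====
-- def numIslandCities(grid):
--     # Write your code here
--     def dfs(grid, x, y):
--         if x < 0 or x >= len(grid) or y < 0 or y >= len(grid[0]):
--             return False
--         if grid[x][y] == 0:
--             return False
--
--         have_city = False
--         if grid[x][y] == 2:
--             have_city = True
--         grid[x][y] = 0
--         have_city = dfs(grid, x + 1, y) or have_city
--         have_city = dfs(grid, x - 1, y) or have_city
--         have_city = dfs(grid, x, y + 1) or have_city
--         have_city = dfs(grid, x, y - 1) or have_city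
--         return have_city
--
--     if not grid or not grid[0]:
--         return 0
--
--     m, n, cnt = len(grid[0]), len(grid), 0
--     for i in range(n):
--         for j in range(m):
--             if grid[i][j]:
--                 if dfs(grid, i, j):
--                     cnt += 1
--     return cnt
-- ===== SOURCE B (Python) =====
-- def numIslandCities(grid):
--     # Iterative flood-fill with an explicit stack instead of recursion.
--     if not grid or not grid[0]:
--         return 0
--     n, m = len(grid), len(grid[0])
--     cnt = 0
--     for i in range(n):
--         for j in range(m):
--             if grid[i][j]:
--                 have_city = False
--                 stack = [(i, j)]
--                 while stack:
--                     x, y = stack.pop()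
--                     if x < 0 or x >= n or y < 0 or y >= m or grid[x][y] == 0:
--                         continue
--                     if grid[x][y] == 2:
--                         have_city = True
--                     grid[x][y] = 0
--                     stack.extend([(x, y - 1), (x, y + 1), (x - 1, y), (x + 1, y)])
--                 if have_city:
--                     cnt += 1
--     return cnt
-- ===== Notes on version B (the rewrite author's own statement) =====
-- stated objective: alternative
-- what changed: The recursive 4-way DFS flood-fill is replaced by an iterative flood-fill that maintains an explicit stack (list of coordinates, pop/extend) per component, so no recursion is used and deep components cannot overflow the call stack.
import Mathlib
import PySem

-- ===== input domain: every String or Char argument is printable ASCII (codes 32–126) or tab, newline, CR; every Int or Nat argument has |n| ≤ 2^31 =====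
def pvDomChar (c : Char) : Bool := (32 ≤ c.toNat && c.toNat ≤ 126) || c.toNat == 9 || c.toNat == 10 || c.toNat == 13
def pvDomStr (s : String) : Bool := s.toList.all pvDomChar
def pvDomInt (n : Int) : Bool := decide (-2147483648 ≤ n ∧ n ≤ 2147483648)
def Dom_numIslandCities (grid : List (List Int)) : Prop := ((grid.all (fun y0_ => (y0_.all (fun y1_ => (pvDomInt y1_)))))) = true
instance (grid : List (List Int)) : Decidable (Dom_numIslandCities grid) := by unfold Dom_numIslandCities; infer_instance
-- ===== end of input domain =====

-- B replaces A's recursive DFS flood-fill by an iterative flood-fill with an explicit stack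
-- (no recursion); both mutate the grid identically in Python (zeroing each component).
-- Equivalence is about the RETURN value.

-- ===== PORT A =====

-- grid[x][y] (read; indices are guarded by bounds checks in both programs before use)
def pvCell (g : List (List Int)) (x y : Int) : Int :=
  PySem.List.pyGetD (PySem.List.pyGetD g x []) y 0

-- grid[x][y] = 0
def pvZero (g : List (List Int)) (x y : Int) : List (List Int) :=
  PySem.List.pySetD g x (PySem.List.pySetD (PySem.List.pyGetD g x []) y 0)

-- termination measure: number of nonzero cells
def pvMu (g : List (List Int)) : Nat := g.flatten.countP (fun v => v != 0)

lemma pvRow_set_lt (r : List Int) (b : Nat) (h : r.getD b 0 ≠ 0) :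
    (r.set b 0).countP (fun v => v != 0) < r.countP (fun v => v != 0) := by
  induction r generalizing b with
  | nil => simp [List.getD] at h
  | cons a t ih =>
    cases b with
    | zero =>
      simp only [List.getD, List.getElem?_cons_zero, Option.getD_some] at h
      simp [h]
    | succ b =>
      simp only [List.getD, List.getElem?_cons_succ] at h
      have := ih b (by simpa [List.getD] using h)
      simp only [List.set, List.countP_cons]
      omega

lemma pvMu_zero_lt (g : List (List Int)) (a b : Nat)
    (h : (g.getD a []).getD b 0 ≠ 0) :
    pvMu (g.set a ((g.getD a []).set b 0)) < pvMu g := by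
  induction g generalizing a with
  | nil => simp [List.getD] at h
  | cons r t ih =>
    cases a with
    | zero =>
      simp only [List.getD, List.getElem?_cons_zero, Option.getD_some] at h ⊢
      have := pvRow_set_lt r b h
      simp only [pvMu, List.set, List.flatten_cons, List.countP_append]
      omega
    | succ a =>
      simp only [List.getD, List.getElem?_cons_succ] at h
      have := ih a (by simpa [List.getD] using h)
      simp only [pvMu, List.set, List.flatten_cons, List.countP_append, List.getD,
        List.getElem?_cons_succ] at *
      omega

lemma pvZero_shape (g : List (List Int)) (a b : Nat) :
    (g.set a ((g.getD a []).set b 0)).map List.length = g.map List.length := by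
  induction g generalizing a with
  | nil => simp
  | cons r t ih =>
    cases a with
    | zero => simp [List.getD]
    | succ a => simpa [List.getD] using ih a

-- cast the in-port decrease facts to Int indices (both programs only reach them with 0 ≤ x, 0 ≤ y)
lemma pvMu_pvZero_lt (g : List (List Int)) (x y : Int) (hx : 0 ≤ x) (hy : 0 ≤ y)
    (h : pvCell g x y ≠ 0) : pvMu (pvZero g x y) < pvMu g := by
  obtain ⟨a, rfl⟩ : ∃ a : Nat, x = (a : Int) := ⟨x.toNat, (Int.toNat_of_nonneg hx).symm⟩
  obtain ⟨b, rfl⟩ : ∃ b : Nat, y = (b : Int) := ⟨y.toNat, (Int.toNat_of_nonneg hy).symm⟩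
  simp only [pvCell, PySem.List.pyGetD_natCast] at h
  simp only [pvZero, PySem.List.pyGetD_natCast, PySem.List.pySetD_natCast]
  exact pvMu_zero_lt g a b h

lemma pvZero_shape_int (g : List (List Int)) (x y : Int) (hx : 0 ≤ x) (hy : 0 ≤ y) :
    (pvZero g x y).map List.length = g.map List.length := by
  obtain ⟨a, rfl⟩ : ∃ a : Nat, x = (a : Int) := ⟨x.toNat, (Int.toNat_of_nonneg hx).symm⟩
  obtain ⟨b, rfl⟩ : ∃ b : Nat, y = (b : Int) := ⟨y.toNat, (Int.toNat_of_nonneg hy).symm⟩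
  simp only [pvZero, PySem.List.pyGetD_natCast, PySem.List.pySetD_natCast]
  exact pvZero_shape g a b

-- A's recursive dfs; the subtype carries the invariants (measure does not increase,
-- row lengths are preserved) needed for termination of the sequential recursive calls.
set_option maxHeartbeats 1000000 in
def dfsA (g : List (List Int)) (x y : Int) :
    {p : Bool × List (List Int) //
      pvMu p.2 ≤ pvMu g ∧ p.2.map List.length = g.map List.length} :=
  if h1 : x < 0 ∨ (g.length : Int) ≤ x ∨ y < 0 ∨ ((PySem.List.pyGetD g 0 []).length : Int) ≤ y then
    ⟨(false, g), le_refl _, rfl⟩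
  else if h2 : pvCell g x y = 0 then
    ⟨(false, g), le_refl _, rfl⟩
  else
    -- 0 ≤ x, 0 ≤ y and a live cell: record the city, zero the cell,
    -- recurse on the four neighbours in A's order (down, up, right, left)
    have hx : 0 ≤ x := by omega
    have hy : 0 ≤ y := by omega
    have hlt : pvMu (pvZero g x y) < pvMu g := pvMu_pvZero_lt g x y hx hy h2
    have hsh : (pvZero g x y).map List.length = g.map List.length := pvZero_shape_int g x y hx hy
    let c0 : Bool := pvCell g x y == 2
    match dfsA (pvZero g x y) (x + 1) y with
    | ⟨(d1, g1), hq1, hs1⟩ =>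
      match dfsA g1 (x - 1) y with
      | ⟨(d2, g2), hq2, hs2⟩ =>
        match dfsA g2 x (y + 1) with
        | ⟨(d3, g3), hq3, hs3⟩ =>
          match dfsA g3 x (y - 1) with
          | ⟨(d4, g4), hq4, hs4⟩ =>
            ⟨(d4 || (d3 || (d2 || (d1 || c0))), g4),
              le_trans hq4 (le_trans hq3 (le_trans hq2 (le_trans hq1 (le_of_lt hlt)))),
              by rw [hs4, hs3, hs2, hs1, hsh]⟩
termination_by pvMu g
decreasing_by
  · exact hlt
  · exact lt_of_le_of_lt hq1 hlt
  · exact lt_of_le_of_lt (le_trans hq2 hq1) hlt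
  · exact lt_of_le_of_lt (le_trans hq3 (le_trans hq2 hq1)) hlt

def numIslandCities (grid : List (List Int)) : Int :=
  if grid = [] then 0
  else if PySem.List.pyGetD grid 0 [] = [] then 0
  else
    let m := (PySem.List.pyGetD grid 0 []).length
    let n := grid.length
    ((List.range n).foldl (fun s i =>
      (List.range m).foldl (fun s j =>
        if pvCell s.1 (Int.ofNat i) (Int.ofNat j) ≠ 0 then
          let d := dfsA s.1 (Int.ofNat i) (Int.ofNat j)
          (d.1.2, if d.1.1 then s.2 + 1 else s.2)
        else s) s) (grid, (0 : Int))).2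

-- ===== PORT B =====

-- the explicit stack: head = top (Python's list.pop() end; extend order reversed accordingly)
def floodB (n m : Int) (g : List (List Int)) (stack : List (Int × Int)) (acc : Bool) :
    Bool × List (List Int) :=
  match stack with
  | [] => (acc, g)
  | (x, y) :: rest =>
    if h : x < 0 ∨ n ≤ x ∨ y < 0 ∨ m ≤ y ∨ pvCell g x y = 0 then
      floodB n m g rest acc
    else
      floodB n m (pvZero g x y)
        ((x + 1, y) :: (x - 1, y) :: (x, y + 1) :: (x, y - 1) :: rest)
        (acc || (pvCell g x y == 2))
termination_by (pvMu g, stack.length)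
decreasing_by
  · exact Prod.Lex.right _ (by simp)
  · exact Prod.Lex.left _ _ (pvMu_pvZero_lt g x y (by omega) (by omega) (by tauto))

def numIslandCities_alt (grid : List (List Int)) : Int :=
  if grid = [] then 0
  else if PySem.List.pyGetD grid 0 [] = [] then 0
  else
    let n := grid.length
    let m := (PySem.List.pyGetD grid 0 []).length
    ((List.range n).foldl (fun s i =>
      (List.range m).foldl (fun s j =>
        if pvCell s.1 (Int.ofNat i) (Int.ofNat j) ≠ 0 then
          let r := floodB (n : Int) (m : Int) s.1 [(Int.ofNat i, Int.ofNat j)] false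
          (r.2, if r.1 then s.2 + 1 else s.2)
        else s) s) (grid, (0 : Int))).2

-- ===== PRECONDITION & SPEC =====
-- Pre_ excludes exactly the grids on which Python A raises IndexError: a ragged grid whose
-- first row is longer than some other row (the scan reads column j < len(grid[0]) of every row).
def Pre_numIslandCities (grid : List (List Int)) : Prop :=
  ∀ r ∈ grid, (PySem.List.pyGetD grid 0 []).length ≤ r.length
instance (grid : List (List Int)) : Decidable (Pre_numIslandCities grid) := by
  unfold Pre_numIslandCities; infer_instance

def pvWitness_numIslandCities : List (List Int) := [[1, 2], [0, 1]]

def Spec_numIslandCities (grid : List (List Int)) (out : Int) : Prop := out = numIslandCities_alt grid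
instance (grid : List (List Int)) (out : Int) : Decidable (Spec_numIslandCities grid out) := by
  unfold Spec_numIslandCities; infer_instance

-- ===== CLAIM (what is proved, stated in full; the proofs are below) =====
def Claim_equal_numIslandCities : Prop := ∀ (grid : List (List Int)), Dom_numIslandCities grid → Pre_numIslandCities grid → Spec_numIslandCities grid (numIslandCities grid)

-- ===== LEMMAS AND PROOFS =====

lemma pvShape_len {g g' : List (List Int)} (h : g.map List.length = g'.map List.length) :
    g.length = g'.length := by
  have := congrArg List.length h
  simpa using this

lemma pvShape_head {g g' : List (List Int)} (h : g.map List.length = g'.map List.length) :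
    (PySem.List.pyGetD g 0 []).length = (PySem.List.pyGetD g' 0 []).length := by
  cases g with
  | nil => cases g' with
    | nil => rfl
    | cons r t => simp at h
  | cons r t =>
    cases g' with
    | nil => simp at h
    | cons r' t' =>
      simp only [List.map_cons, List.cons.injEq] at h
      simp [PySem.List.pyGetD_zero, List.getD, h.1]

-- unfolding dfsA on a live in-range cell, in projection form
lemma pvDfsA_live (g : List (List Int)) (x y : Int)
    (h1 : ¬(x < 0 ∨ (g.length : Int) ≤ x ∨ y < 0 ∨ ((PySem.List.pyGetD g 0 []).length : Int) ≤ y))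
    (h2 : pvCell g x y ≠ 0) :
    (dfsA g x y).1
      = ((dfsA (dfsA (dfsA (dfsA (pvZero g x y) (x+1) y).1.2 (x-1) y).1.2 x (y+1)).1.2 x (y-1)).1.1
          || ((dfsA (dfsA (dfsA (pvZero g x y) (x+1) y).1.2 (x-1) y).1.2 x (y+1)).1.1
          || ((dfsA (dfsA (pvZero g x y) (x+1) y).1.2 (x-1) y).1.1
          || ((dfsA (pvZero g x y) (x+1) y).1.1 || (pvCell g x y == 2)))),
        (dfsA (dfsA (dfsA (dfsA (pvZero g x y) (x+1) y).1.2 (x-1) y).1.2 x (y+1)).1.2 x (y-1)).1.2) := by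
  conv_lhs => rw [dfsA, dif_neg h1, dif_neg h2]
  split
  next d1 g1 hp1 heq1 =>
    rw [heq1]
    split
    next d2 g2 hp2 heq2 =>
      rw [heq2]
      split
      next d3 g3 hp3 heq3 =>
        rw [heq3]
        split
        next d4 g4 hp4 heq4 =>
          rw [heq4]

-- the simulation: popping (x,y) off the stack computes exactly A's dfs on (x,y)
lemma pvFlood_sim : ∀ (N : Nat) (g : List (List Int)), pvMu g < N →
    ∀ (x y : Int) (rest : List (Int × Int)) (acc : Bool),
    floodB (g.length : Int) ((PySem.List.pyGetD g 0 []).length : Int) g ((x, y) :: rest) acc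
      = floodB (g.length : Int) ((PySem.List.pyGetD g 0 []).length : Int)
          (dfsA g x y).1.2 rest (acc || (dfsA g x y).1.1) := by
  intro N
  induction N with
  | zero => intro g h; omega
  | succ N ih =>
    intro g hN x y rest acc
    by_cases h1 : x < 0 ∨ (g.length : Int) ≤ x ∨ y < 0 ∨ ((PySem.List.pyGetD g 0 []).length : Int) ≤ y
    · rw [dfsA, floodB, dif_pos (by tauto)]
      simp [h1]
    · by_cases h2 : pvCell g x y = 0
      · rw [dfsA, floodB, dif_pos (by tauto)]
        simp [h1, h2]
      · -- live cell
        have hx : (0:Int) ≤ x := by omega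
        have hy : (0:Int) ≤ y := by omega
        have hlt : pvMu (pvZero g x y) < pvMu g := pvMu_pvZero_lt g x y hx hy h2
        have hsh0 : (pvZero g x y).map List.length = g.map List.length :=
          pvZero_shape_int g x y hx hy
        rw [floodB, dif_neg (by tauto)]
        -- names for the four sequential dfs results
        set g0 := pvZero g x y with hg0
        set R1 := dfsA g0 (x + 1) y with hR1
        set R2 := dfsA R1.1.2 (x - 1) y with hR2
        set R3 := dfsA R2.1.2 x (y + 1) with hR3
        set R4 := dfsA R3.1.2 x (y - 1) with hR4
        have hsh1 : R1.1.2.map List.length = g.map List.length := hR1 ▸ (R1.2.2.trans hsh0)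
        have hsh2 : R2.1.2.map List.length = g.map List.length := R2.2.2.trans hsh1
        have hsh3 : R3.1.2.map List.length = g.map List.length := R3.2.2.trans hsh2
        have hmu0 : pvMu g0 < N := by omega
        have hmu1 : pvMu R1.1.2 < N := lt_of_le_of_lt R1.2.1 hmu0
        have hmu2 : pvMu R2.1.2 < N := lt_of_le_of_lt R2.2.1 hmu1
        have hmu3 : pvMu R3.1.2 < N := lt_of_le_of_lt R3.2.1 hmu2
        have e0l : (g.length : Int) = (g0.length : Int) := by rw [pvShape_len hsh0]
        have e0h : ((PySem.List.pyGetD g 0 []).length : Int)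
            = ((PySem.List.pyGetD g0 0 []).length : Int) := by rw [pvShape_head hsh0]
        have e1l : (g.length : Int) = (R1.1.2.length : Int) := by rw [pvShape_len hsh1]
        have e1h : ((PySem.List.pyGetD g 0 []).length : Int)
            = ((PySem.List.pyGetD R1.1.2 0 []).length : Int) := by rw [pvShape_head hsh1]
        have e2l : (g.length : Int) = (R2.1.2.length : Int) := by rw [pvShape_len hsh2]
        have e2h : ((PySem.List.pyGetD g 0 []).length : Int)
            = ((PySem.List.pyGetD R2.1.2 0 []).length : Int) := by rw [pvShape_head hsh2]
        have e3l : (g.length : Int) = (R3.1.2.length : Int) := by rw [pvShape_len hsh3]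
        have e3h : ((PySem.List.pyGetD g 0 []).length : Int)
            = ((PySem.List.pyGetD R3.1.2 0 []).length : Int) := by rw [pvShape_head hsh3]
        calc floodB (g.length : Int) ((PySem.List.pyGetD g 0 []).length : Int) g0
                ((x+1, y) :: (x-1, y) :: (x, y+1) :: (x, y-1) :: rest)
                (acc || (pvCell g x y == 2))
            = floodB (g.length : Int) ((PySem.List.pyGetD g 0 []).length : Int) R1.1.2
                ((x-1, y) :: (x, y+1) :: (x, y-1) :: rest)
                ((acc || (pvCell g x y == 2)) || R1.1.1) := by
              rw [e0l, e0h, ih g0 hmu0, ← e0l, ← e0h]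
          _ = floodB (g.length : Int) ((PySem.List.pyGetD g 0 []).length : Int) R2.1.2
                ((x, y+1) :: (x, y-1) :: rest)
                (((acc || (pvCell g x y == 2)) || R1.1.1) || R2.1.1) := by
              rw [e1l, e1h, ih R1.1.2 hmu1, ← e1l, ← e1h]
          _ = floodB (g.length : Int) ((PySem.List.pyGetD g 0 []).length : Int) R3.1.2
                ((x, y-1) :: rest)
                ((((acc || (pvCell g x y == 2)) || R1.1.1) || R2.1.1) || R3.1.1) := by
              rw [e2l, e2h, ih R2.1.2 hmu2, ← e2l, ← e2h]
          _ = floodB (g.length : Int) ((PySem.List.pyGetD g 0 []).length : Int) R4.1.2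
                rest
                (((((acc || (pvCell g x y == 2)) || R1.1.1) || R2.1.1) || R3.1.1) || R4.1.1) := by
              rw [e3l, e3h, ih R3.1.2 hmu3, ← e3l, ← e3h]
          _ = floodB (g.length : Int) ((PySem.List.pyGetD g 0 []).length : Int)
                (dfsA g x y).1.2 rest (acc || (dfsA g x y).1.1) := by
              rw [pvDfsA_live g x y h1 h2, ← hg0, ← hR1, ← hR2, ← hR3, ← hR4]
              congr 1
              cases acc <;> cases R1.1.1 <;> cases R2.1.1 <;> cases R3.1.1 <;> cases R4.1.1 <;> simp

lemma pvFlood_single (g : List (List Int)) (x y : Int) :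
    floodB (g.length : Int) ((PySem.List.pyGetD g 0 []).length : Int) g [(x, y)] false
      = ((dfsA g x y).1.1, (dfsA g x y).1.2) := by
  rw [pvFlood_sim (pvMu g + 1) g (by omega)]
  rw [floodB]
  simp

lemma pvFoldl_inv_congr {α σ : Type} (P : σ → Prop) (f h : σ → α → σ)
    (hstep : ∀ s a, P s → f s a = h s a ∧ P (f s a)) :
    ∀ (l : List α) (s : σ), P s → l.foldl f s = l.foldl h s ∧ P (l.foldl f s) := by
  intro l
  induction l with
  | nil => intro s hs; exact ⟨rfl, hs⟩
  | cons a t ih =>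
    intro s hs
    obtain ⟨he, hp⟩ := hstep s a hs
    rw [List.foldl_cons, List.foldl_cons, he]
    exact ih (h s a) (he ▸ hp)

-- ===== VERDICT (by name: the statement is the Claim_ definition above) =====
theorem numIslandCities_spec : Claim_equal_numIslandCities := by
  intro grid _ _
  unfold Spec_numIslandCities numIslandCities numIslandCities_alt
  by_cases hnil : grid = []
  · simp [hnil]
  · by_cases hhd : PySem.List.pyGetD grid 0 [] = []
    · simp [hnil, hhd]
    · simp only [if_neg hnil, if_neg hhd]
      have step : ∀ (s : (List (List Int)) × Int) (i : Nat),
          s.1.map List.length = grid.map List.length →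
          ((List.range (PySem.List.pyGetD grid 0 []).length).foldl (fun s j =>
            if pvCell s.1 (Int.ofNat i) (Int.ofNat j) ≠ 0 then
              let d := dfsA s.1 (Int.ofNat i) (Int.ofNat j)
              (d.1.2, if d.1.1 then s.2 + 1 else s.2)
            else s) s
          = (List.range (PySem.List.pyGetD grid 0 []).length).foldl (fun s j =>
            if pvCell s.1 (Int.ofNat i) (Int.ofNat j) ≠ 0 then
              let r := floodB (grid.length : Int) ((PySem.List.pyGetD grid 0 []).length : Int)
                s.1 [(Int.ofNat i, Int.ofNat j)] false
              (r.2, if r.1 then s.2 + 1 else s.2)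
            else s) s)
          ∧ ((List.range (PySem.List.pyGetD grid 0 []).length).foldl (fun s j =>
            if pvCell s.1 (Int.ofNat i) (Int.ofNat j) ≠ 0 then
              let d := dfsA s.1 (Int.ofNat i) (Int.ofNat j)
              (d.1.2, if d.1.1 then s.2 + 1 else s.2)
            else s) s).1.map List.length = grid.map List.length := by
        intro s i hs
        refine pvFoldl_inv_congr
          (fun s : (List (List Int)) × Int => s.1.map List.length = grid.map List.length)
          _ _ ?_ (List.range (PySem.List.pyGetD grid 0 []).length) s hs
        intro s j hs
        by_cases hc : pvCell s.1 (Int.ofNat i) (Int.ofNat j) ≠ 0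
        · have el : (grid.length : Int) = (s.1.length : Int) := by rw [pvShape_len hs]
          have eh : ((PySem.List.pyGetD grid 0 []).length : Int)
              = ((PySem.List.pyGetD s.1 0 []).length : Int) := by rw [pvShape_head hs]
          constructor
          · simp only [if_pos hc, el, eh, pvFlood_single]
          · simp only [if_pos hc]
            exact (dfsA s.1 (Int.ofNat i) (Int.ofNat j)).2.2.trans hs
        · push Not at hc
          exact ⟨by rw [if_neg (fun hne => hne hc), if_neg (fun hne => hne hc)],
            by rw [if_neg (fun hne => hne hc)]; exact hs⟩
      have main := pvFoldl_inv_congr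
        (fun s : (List (List Int)) × Int => s.1.map List.length = grid.map List.length)
        _ _ (fun s i hs => step s i hs)
        (List.range grid.length) (grid, (0 : Int)) rfl
      exact congrArg Prod.snd main.1
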